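-- pv_equiv track=rewrite | github.com/ad3002/aindex | test_kmer_conversion.py | index_to_13mer
-- ===== SOURCE A (Python) =====
-- def index_to_13mer(index: int) -> str:
--     """
--     Convert index to 13-mer string
--
--     Args:
--         index: Index in the range [0, 4^13-1]
--
--     Returns:
--         13-mer string
--     """
--     nucleotides = ['A', 'C', 'G', 'T']
--     kmer = []
--     temp_index = index
--
--     for i in range(13):
--         kmer.append(nucleotides[temp_index % 4])
--         temp_index //= 4
--
--     return ''.join(reversed(kmer))
-- ===== SOURCE B (Python) =====
-- def index_to_13mer(index: int) -> str:
--     # Two-digit block decomposition: a precomputed 16-entry dinucleotide table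
--     # emits the 12 low bases in 6 pair lookups after a single leading base.
--     nucleotides = 'ACGT'
--     pairs = [a + b for a in nucleotides for b in nucleotides]
--     s = nucleotides[index // 4 ** 12 % 4]
--     for k in range(5, -1, -1):
--         s += pairs[index // 4 ** (2 * k) % 16]
--     return s
-- ===== Notes on version B (the rewrite author's own statement) =====
-- stated objective: alternative
-- what changed: B replaces A's 13-step divmod-and-reverse loop with a block decomposition: it precomputes a 16-entry dinucleotide table and builds the string in final order as one leading base plus 6 two-base table lookups (index // 4**(2k) % 16).
import Mathlib
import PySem

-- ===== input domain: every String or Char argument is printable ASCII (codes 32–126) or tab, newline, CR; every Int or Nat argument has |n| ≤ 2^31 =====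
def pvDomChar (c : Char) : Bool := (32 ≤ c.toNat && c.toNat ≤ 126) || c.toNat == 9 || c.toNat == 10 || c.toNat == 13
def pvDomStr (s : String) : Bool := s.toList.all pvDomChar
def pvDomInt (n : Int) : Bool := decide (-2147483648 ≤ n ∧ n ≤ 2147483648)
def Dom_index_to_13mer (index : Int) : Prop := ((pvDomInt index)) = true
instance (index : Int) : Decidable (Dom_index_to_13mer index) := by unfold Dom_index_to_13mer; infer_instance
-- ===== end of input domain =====

-- B builds the 13-mer by block decomposition: a precomputed 16-entry dinucleotide table, one
-- leading base and six two-base table lookups in final order (no digit-by-digit loop, no reversal).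

-- ===== PORT A =====
def index_to_13mer (index : Int) : String :=
  let nucleotides : List Char := ['A', 'C', 'G', 'T']
  -- kmer/temp_index loop: state (kmer, temp_index); nucleotides[temp % 4] is always in range,
  -- so pyGetD's default is never used (exact).
  let st := (PySem.List.pyRange 0 13 1).foldl
    (fun (st : List Char × Int) _ =>
      (st.1 ++ [PySem.List.pyGetD nucleotides (PySem.Int.mod st.2 4) 'A'],
       PySem.Int.floordiv st.2 4))
    ([], index)
  String.ofList st.1.reverse

-- ===== PORT B =====
def index_to_13mer_alt (index : Int) : String :=
  let nucleotides : List Char := ['A', 'C', 'G', 'T']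
  -- pairs = [a + b for a in nucleotides for b in nucleotides]; strings carried as List Char,
  -- final result converted once via String.ofList (exact).
  let pairs : List (List Char) := nucleotides.flatMap (fun a => nucleotides.map (fun b => [a] ++ [b]))
  let s : List Char := [PySem.List.pyGetD nucleotides
    (PySem.Int.mod (PySem.Int.floordiv index (4 ^ 12)) 4) 'A']
  let s := (PySem.List.pyRange 5 (-1) (-1)).foldl
    (fun (s : List Char) k =>
      s ++ PySem.List.pyGetD pairs
        (PySem.Int.mod (PySem.Int.floordiv index (4 ^ (2 * k).toNat)) 16) [])
    s
  String.ofList s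

-- ===== PRECONDITION & SPEC =====
def Spec_index_to_13mer (index : Int) (out : String) : Prop := out = index_to_13mer_alt index
instance (index : Int) (out : String) : Decidable (Spec_index_to_13mer index out) := by unfold Spec_index_to_13mer; infer_instance

-- ===== CLAIM (what is proved, stated in full; the proofs are below) =====
def Claim_equal_index_to_13mer : Prop := ∀ (index : Int), Dom_index_to_13mer index → Spec_index_to_13mer index (index_to_13mer index)

-- ===== LEMMAS AND PROOFS =====

-- successive //4 steps compose: (a // 4^k) // 4 = a // 4^(k+1)
theorem pv_fd_step (a : Int) (k : Nat) :
    PySem.Int.floordiv (PySem.Int.floordiv a (4 ^ k)) 4 = PySem.Int.floordiv a (4 ^ (k + 1)) := by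
  rw [PySem.Int.floordiv_eq_ediv_of_pos (a := a) (by positivity),
      PySem.Int.floordiv_eq_ediv_of_pos (by norm_num),
      PySem.Int.floordiv_eq_ediv_of_pos (a := a) (by positivity),
      Int.ediv_ediv_of_nonneg (by positivity : (0:Int) ≤ 4 ^ k), pow_succ]

theorem pv_fd_zero (a : Int) : PySem.Int.floordiv a (4 ^ (0:Nat)) = a := by
  rw [PySem.Int.floordiv_eq_ediv_of_pos (by norm_num)]; simp

-- a dinucleotide table lookup at x % 16 is the two base-4 digits of x
theorem pv_pair_lookup (x : Int) :
    PySem.List.pyGetD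
      ([['A','A'], ['A','C'], ['A','G'], ['A','T'], ['C','A'], ['C','C'], ['C','G'], ['C','T'], ['G','A'], ['G','C'], ['G','G'], ['G','T'], ['T','A'], ['T','C'], ['T','G'], ['T','T']] : List (List Char))
      (PySem.Int.mod x 16) ([] : List Char)
    = [PySem.List.pyGetD (['A','C','G','T'] : List Char)
         (PySem.Int.mod (PySem.Int.floordiv x 4) 4) 'A',
       PySem.List.pyGetD (['A','C','G','T'] : List Char) (PySem.Int.mod x 4) 'A'] := by
  rw [PySem.Int.mod_eq_emod_of_pos (by norm_num), PySem.Int.mod_eq_emod_of_pos (by norm_num),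
      PySem.Int.mod_eq_emod_of_pos (by norm_num), PySem.Int.floordiv_eq_ediv_of_pos (by norm_num)]
  have h0 : 0 ≤ x % 16 := Int.emod_nonneg x (by norm_num)
  have h1 : x % 16 < 16 := Int.emod_lt_of_pos x (by norm_num)
  have hd : (x / 4) % 4 = (x % 16) / 4 := by omega
  have hm : x % 4 = (x % 16) % 4 := by omega
  rw [hd, hm]
  set m := x % 16 with hmdef
  interval_cases m <;> decide

-- ===== VERDICT (by name: the statement is the Claim_ definition above) =====
theorem index_to_13mer_spec : Claim_equal_index_to_13mer := by
  intro index _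
  show _ = _
  rw [index_to_13mer, index_to_13mer_alt,
      show PySem.List.pyRange 0 13 1 = [0,1,2,3,4,5,6,7,8,9,10,11,12] by decide,
      show PySem.List.pyRange 5 (-1) (-1) = [5,4,3,2,1,0] by decide]
  simp only [List.foldl, List.map, List.reverse, List.reverseAux, List.cons_append,
    List.nil_append, List.flatMap, List.flatten_cons, List.flatten_nil, List.append_assoc, List.append_nil]
  rw [show ((2:Int)*5).toNat = 10 by decide, show ((2:Int)*4).toNat = 8 by decide,
      show ((2:Int)*3).toNat = 6 by decide, show ((2:Int)*2).toNat = 4 by decide,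
      show ((2:Int)*1).toNat = 2 by decide, show ((2:Int)*0).toNat = 0 by decide]
  rw [pv_pair_lookup, pv_pair_lookup, pv_pair_lookup, pv_pair_lookup, pv_pair_lookup,
      pv_pair_lookup]
  rw [← pv_fd_zero index]
  simp only [pv_fd_step]
  norm_num
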